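-- pv_equiv track=rewrite | github.com/numaan0/travel-genius-agents | agent/services/dynamic_ingestion_service.py | _classify_destination
-- ===== SOURCE A (Python) =====
-- from typing import Dict, Any, List, Optional
--
-- def _classify_destination(types: List[str]) -> str:
--     """Classify destination based on Google Places types"""
--     if any(t in types for t in ['church', 'hindu_temple', 'mosque', 'synagogue', 'tourist_attraction']):
--         return 'heritage'
--     elif any(t in types for t in ['natural_feature', 'park', 'campground']):
--         return 'adventure'
--     elif any(t in types for t in ['museum', 'art_gallery', 'cultural_center']):
--         return 'cultural'
--     elif any(t in types for t in ['night_club', 'bar', 'casino']):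
--         return 'party'
--     elif any(t in types for t in ['spa', 'resort_hotel']):
--         return 'luxury'
--     else:
--         return 'cultural'
-- ===== SOURCE B (Python) =====
-- _CATMAP = {
--     'church': (0, 'heritage'), 'hindu_temple': (0, 'heritage'), 'mosque': (0, 'heritage'),
--     'synagogue': (0, 'heritage'), 'tourist_attraction': (0, 'heritage'),
--     'natural_feature': (1, 'adventure'), 'park': (1, 'adventure'), 'campground': (1, 'adventure'),
--     'museum': (2, 'cultural'), 'art_gallery': (2, 'cultural'), 'cultural_center': (2, 'cultural'),
--     'night_club': (3, 'party'), 'bar': (3, 'party'), 'casino': (3, 'party'),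
--     'spa': (4, 'luxury'), 'resort_hotel': (4, 'luxury'),
-- }
--
-- def _classify_destination(types):
--     best_rank = 100
--     best_cat = 'cultural'
--     for t in types:
--         rc = _CATMAP.get(t)
--         if rc is not None and rc[0] < best_rank:
--             best_rank, best_cat = rc
--     return best_cat
-- ===== Notes on version B (the rewrite author's own statement) =====
-- stated objective: faster
-- what changed: Replaced the five sequential any()-membership branch chains (each scanning types repeatedly) with a constant rank/category table and a single min-rank scan over the input list.
import Mathlib
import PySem

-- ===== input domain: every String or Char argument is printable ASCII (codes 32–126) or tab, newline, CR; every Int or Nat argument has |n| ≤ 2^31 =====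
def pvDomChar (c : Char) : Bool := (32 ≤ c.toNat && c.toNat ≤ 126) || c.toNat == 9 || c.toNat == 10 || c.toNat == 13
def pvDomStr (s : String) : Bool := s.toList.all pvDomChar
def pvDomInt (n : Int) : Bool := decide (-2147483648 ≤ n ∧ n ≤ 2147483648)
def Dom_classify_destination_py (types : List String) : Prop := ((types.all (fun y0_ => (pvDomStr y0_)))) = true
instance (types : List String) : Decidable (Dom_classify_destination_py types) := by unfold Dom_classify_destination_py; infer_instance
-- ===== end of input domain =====

-- B replaces A's five sequential any()-membership branch chains by a constant rank/category
-- table and a single min-rank scan over the input list (objective: alternative decomposition).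

-- ===== PORT A =====
def classify_destination_py (types : List String) : String :=
  if (["church", "hindu_temple", "mosque", "synagogue", "tourist_attraction"] : List String).any
      (fun t => types.contains t) then "heritage"
  else if (["natural_feature", "park", "campground"] : List String).any
      (fun t => types.contains t) then "adventure"
  else if (["museum", "art_gallery", "cultural_center"] : List String).any
      (fun t => types.contains t) then "cultural"
  else if (["night_club", "bar", "casino"] : List String).any
      (fun t => types.contains t) then "party"
  else if (["spa", "resort_hotel"] : List String).any
      (fun t => types.contains t) then "luxury"
  else "cultural"

-- ===== PORT B =====
def pvCatMap : PySem.Dict String (Int × String) := PySem.Dict.mk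
  [("church", (0, "heritage")), ("hindu_temple", (0, "heritage")), ("mosque", (0, "heritage")),
   ("synagogue", (0, "heritage")), ("tourist_attraction", (0, "heritage")),
   ("natural_feature", (1, "adventure")), ("park", (1, "adventure")), ("campground", (1, "adventure")),
   ("museum", (2, "cultural")), ("art_gallery", (2, "cultural")), ("cultural_center", (2, "cultural")),
   ("night_club", (3, "party")), ("bar", (3, "party")), ("casino", (3, "party")),
   ("spa", (4, "luxury")), ("resort_hotel", (4, "luxury"))]

def classify_destination_py_alt (types : List String) : String :=
  (types.foldl
    (fun b t =>
      match pvCatMap.get? t with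
      | some rc => if rc.1 < b.1 then rc else b
      | none => b)
    ((100 : Int), "cultural")).2

-- ===== PRECONDITION & SPEC =====
def Spec_classify_destination_py (types : List String) (out : String) : Prop := out = classify_destination_py_alt types
instance (types : List String) (out : String) : Decidable (Spec_classify_destination_py types out) := by unfold Spec_classify_destination_py; infer_instance

-- ===== CLAIM (what is proved, stated in full; the proofs are below) =====
def Claim_equal_classify_destination_py : Prop := ∀ (types : List String), Dom_classify_destination_py types → Spec_classify_destination_py types (classify_destination_py types)

-- ===== LEMMAS AND PROOFS =====

/-- rank of a place type under B's table (100 = absent). -/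
def rkOf (t : String) : Int :=
  match pvCatMap.get? t with
  | some rc => rc.1
  | none => 100

/-- the category attached to each rank. -/
def catOf (r : Int) : String :=
  if r = 0 then "heritage" else if r = 1 then "adventure" else if r = 3 then "party"
  else if r = 4 then "luxury" else "cultural"

def mn (l : List String) : Int := l.foldl (fun m t => min m (rkOf t)) 100

lemma catMap_consistent (t : String) (rc : Int × String) (h : pvCatMap.get? t = some rc) :
    rc = (rkOf t, catOf (rkOf t)) := by
  have hr : rkOf t = rc.1 := by simp [rkOf, h]
  have hm := PySem.Dict.mem_items_of_get?_eq_some _ h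
  simp only [pvCatMap, List.mem_cons, List.not_mem_nil, or_false, Prod.mk.injEq] at hm
  rw [hr]
  rcases hm with ⟨rfl, rfl⟩ | ⟨rfl, rfl⟩ | ⟨rfl, rfl⟩ | ⟨rfl, rfl⟩ | ⟨rfl, rfl⟩ | ⟨rfl, rfl⟩ | ⟨rfl, rfl⟩ | ⟨rfl, rfl⟩ | ⟨rfl, rfl⟩ | ⟨rfl, rfl⟩ | ⟨rfl, rfl⟩ | ⟨rfl, rfl⟩ | ⟨rfl, rfl⟩ | ⟨rfl, rfl⟩ | ⟨rfl, rfl⟩ | ⟨rfl, rfl⟩ <;> decide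

lemma rk_frwd (t : String) (rc : Int × String) (hg : pvCatMap.get? t = some rc) :
    (t, rc) ∈ [(("church" : String), ((0 : Int), ("heritage" : String))), ("hindu_temple", (0, "heritage")), ("mosque", (0, "heritage")),
      ("synagogue", (0, "heritage")), ("tourist_attraction", (0, "heritage")),
      ("natural_feature", (1, "adventure")), ("park", (1, "adventure")), ("campground", (1, "adventure")),
      ("museum", (2, "cultural")), ("art_gallery", (2, "cultural")), ("cultural_center", (2, "cultural")),
      ("night_club", (3, "party")), ("bar", (3, "party")), ("casino", (3, "party")),
      ("spa", (4, "luxury")), ("resort_hotel", (4, "luxury"))] :=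
  PySem.Dict.mem_items_of_get?_eq_some _ hg

lemma rk_lb (t : String) : 0 ≤ rkOf t := by
  rcases hg : pvCatMap.get? t with _ | rc
  · simp [rkOf, hg]
  · have hr : rkOf t = rc.1 := by simp [rkOf, hg]
    have hm := rk_frwd t rc hg
    simp only [List.mem_cons, List.not_mem_nil, or_false, Prod.mk.injEq] at hm
    rw [hr]
    rcases hm with ⟨rfl, rfl⟩ | ⟨rfl, rfl⟩ | ⟨rfl, rfl⟩ | ⟨rfl, rfl⟩ | ⟨rfl, rfl⟩ | ⟨rfl, rfl⟩ | ⟨rfl, rfl⟩ | ⟨rfl, rfl⟩ | ⟨rfl, rfl⟩ | ⟨rfl, rfl⟩ | ⟨rfl, rfl⟩ | ⟨rfl, rfl⟩ | ⟨rfl, rfl⟩ | ⟨rfl, rfl⟩ | ⟨rfl, rfl⟩ | ⟨rfl, rfl⟩ <;> decide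

lemma rk_cases (t : String) : rkOf t = 0 ∨ rkOf t = 1 ∨ rkOf t = 2 ∨ rkOf t = 3 ∨ rkOf t = 4 ∨ rkOf t = 100 := by
  rcases hg : pvCatMap.get? t with _ | rc
  · simp [rkOf, hg]
  · have hr : rkOf t = rc.1 := by simp [rkOf, hg]
    have hm := rk_frwd t rc hg
    simp only [List.mem_cons, List.not_mem_nil, or_false, Prod.mk.injEq] at hm
    rw [hr]
    rcases hm with ⟨rfl, rfl⟩ | ⟨rfl, rfl⟩ | ⟨rfl, rfl⟩ | ⟨rfl, rfl⟩ | ⟨rfl, rfl⟩ | ⟨rfl, rfl⟩ | ⟨rfl, rfl⟩ | ⟨rfl, rfl⟩ | ⟨rfl, rfl⟩ | ⟨rfl, rfl⟩ | ⟨rfl, rfl⟩ | ⟨rfl, rfl⟩ | ⟨rfl, rfl⟩ | ⟨rfl, rfl⟩ | ⟨rfl, rfl⟩ | ⟨rfl, rfl⟩ <;> decide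

lemma rk_iff_0 (t : String) : rkOf t = 0 ↔ t ∈ (["church", "hindu_temple", "mosque", "synagogue", "tourist_attraction"] : List String) := by
  constructor
  · intro h
    rcases hg : pvCatMap.get? t with _ | rc
    · simp [rkOf, hg] at h
    · have hr : rkOf t = rc.1 := by simp [rkOf, hg]
      have hm := rk_frwd t rc hg
      simp only [List.mem_cons, List.not_mem_nil, or_false, Prod.mk.injEq] at hm
      rw [hr] at h
      rcases hm with ⟨rfl, rfl⟩ | ⟨rfl, rfl⟩ | ⟨rfl, rfl⟩ | ⟨rfl, rfl⟩ | ⟨rfl, rfl⟩ | ⟨rfl, rfl⟩ | ⟨rfl, rfl⟩ | ⟨rfl, rfl⟩ | ⟨rfl, rfl⟩ | ⟨rfl, rfl⟩ | ⟨rfl, rfl⟩ | ⟨rfl, rfl⟩ | ⟨rfl, rfl⟩ | ⟨rfl, rfl⟩ | ⟨rfl, rfl⟩ | ⟨rfl, rfl⟩ <;> first | decide | (exact absurd h (by decide))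
  · intro h; fin_cases h <;> decide

lemma rk_iff_1 (t : String) : rkOf t = 1 ↔ t ∈ (["natural_feature", "park", "campground"] : List String) := by
  constructor
  · intro h
    rcases hg : pvCatMap.get? t with _ | rc
    · simp [rkOf, hg] at h
    · have hr : rkOf t = rc.1 := by simp [rkOf, hg]
      have hm := rk_frwd t rc hg
      simp only [List.mem_cons, List.not_mem_nil, or_false, Prod.mk.injEq] at hm
      rw [hr] at h
      rcases hm with ⟨rfl, rfl⟩ | ⟨rfl, rfl⟩ | ⟨rfl, rfl⟩ | ⟨rfl, rfl⟩ | ⟨rfl, rfl⟩ | ⟨rfl, rfl⟩ | ⟨rfl, rfl⟩ | ⟨rfl, rfl⟩ | ⟨rfl, rfl⟩ | ⟨rfl, rfl⟩ | ⟨rfl, rfl⟩ | ⟨rfl, rfl⟩ | ⟨rfl, rfl⟩ | ⟨rfl, rfl⟩ | ⟨rfl, rfl⟩ | ⟨rfl, rfl⟩ <;> first | decide | (exact absurd h (by decide))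
  · intro h; fin_cases h <;> decide

lemma rk_iff_2 (t : String) : rkOf t = 2 ↔ t ∈ (["museum", "art_gallery", "cultural_center"] : List String) := by
  constructor
  · intro h
    rcases hg : pvCatMap.get? t with _ | rc
    · simp [rkOf, hg] at h
    · have hr : rkOf t = rc.1 := by simp [rkOf, hg]
      have hm := rk_frwd t rc hg
      simp only [List.mem_cons, List.not_mem_nil, or_false, Prod.mk.injEq] at hm
      rw [hr] at h
      rcases hm with ⟨rfl, rfl⟩ | ⟨rfl, rfl⟩ | ⟨rfl, rfl⟩ | ⟨rfl, rfl⟩ | ⟨rfl, rfl⟩ | ⟨rfl, rfl⟩ | ⟨rfl, rfl⟩ | ⟨rfl, rfl⟩ | ⟨rfl, rfl⟩ | ⟨rfl, rfl⟩ | ⟨rfl, rfl⟩ | ⟨rfl, rfl⟩ | ⟨rfl, rfl⟩ | ⟨rfl, rfl⟩ | ⟨rfl, rfl⟩ | ⟨rfl, rfl⟩ <;> first | decide | (exact absurd h (by decide))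
  · intro h; fin_cases h <;> decide

lemma rk_iff_3 (t : String) : rkOf t = 3 ↔ t ∈ (["night_club", "bar", "casino"] : List String) := by
  constructor
  · intro h
    rcases hg : pvCatMap.get? t with _ | rc
    · simp [rkOf, hg] at h
    · have hr : rkOf t = rc.1 := by simp [rkOf, hg]
      have hm := rk_frwd t rc hg
      simp only [List.mem_cons, List.not_mem_nil, or_false, Prod.mk.injEq] at hm
      rw [hr] at h
      rcases hm with ⟨rfl, rfl⟩ | ⟨rfl, rfl⟩ | ⟨rfl, rfl⟩ | ⟨rfl, rfl⟩ | ⟨rfl, rfl⟩ | ⟨rfl, rfl⟩ | ⟨rfl, rfl⟩ | ⟨rfl, rfl⟩ | ⟨rfl, rfl⟩ | ⟨rfl, rfl⟩ | ⟨rfl, rfl⟩ | ⟨rfl, rfl⟩ | ⟨rfl, rfl⟩ | ⟨rfl, rfl⟩ | ⟨rfl, rfl⟩ | ⟨rfl, rfl⟩ <;> first | decide | (exact absurd h (by decide))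
  · intro h; fin_cases h <;> decide

lemma rk_iff_4 (t : String) : rkOf t = 4 ↔ t ∈ (["spa", "resort_hotel"] : List String) := by
  constructor
  · intro h
    rcases hg : pvCatMap.get? t with _ | rc
    · simp [rkOf, hg] at h
    · have hr : rkOf t = rc.1 := by simp [rkOf, hg]
      have hm := rk_frwd t rc hg
      simp only [List.mem_cons, List.not_mem_nil, or_false, Prod.mk.injEq] at hm
      rw [hr] at h
      rcases hm with ⟨rfl, rfl⟩ | ⟨rfl, rfl⟩ | ⟨rfl, rfl⟩ | ⟨rfl, rfl⟩ | ⟨rfl, rfl⟩ | ⟨rfl, rfl⟩ | ⟨rfl, rfl⟩ | ⟨rfl, rfl⟩ | ⟨rfl, rfl⟩ | ⟨rfl, rfl⟩ | ⟨rfl, rfl⟩ | ⟨rfl, rfl⟩ | ⟨rfl, rfl⟩ | ⟨rfl, rfl⟩ | ⟨rfl, rfl⟩ | ⟨rfl, rfl⟩ <;> first | decide | (exact absurd h (by decide))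
  · intro h; fin_cases h <;> decide

lemma step_eq (t : String) (r : Int) (hr : r ≤ 100) :
    (match pvCatMap.get? t with
      | some rc => if rc.1 < r then rc else (r, catOf r)
      | none => (r, catOf r)) = (min r (rkOf t), catOf (min r (rkOf t))) := by
  rcases h : pvCatMap.get? t with _ | rc
  · have h100 : rkOf t = 100 := by simp [rkOf, h]
    simp [h100, min_eq_left hr]
  · have hc := catMap_consistent t rc h
    subst hc
    by_cases hlt : rkOf t < r
    · simp [hlt, min_eq_right (le_of_lt hlt)]
    · simp [hlt, min_eq_left (le_of_not_gt hlt)]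

lemma fold_eq (l : List String) (r : Int) (hr : r ≤ 100) :
    l.foldl
      (fun b t =>
        match pvCatMap.get? t with
        | some rc => if rc.1 < b.1 then rc else b
        | none => b)
      (r, catOf r)
    = (l.foldl (fun m t => min m (rkOf t)) r,
       catOf (l.foldl (fun m t => min m (rkOf t)) r)) := by
  induction l generalizing r with
  | nil => simp
  | cons t l ih =>
    simp only [List.foldl_cons]
    rw [step_eq t r hr, ih (min r (rkOf t)) (le_trans (min_le_left _ _) hr)]

lemma alt_eq (types : List String) : classify_destination_py_alt types = catOf (mn types) := by
  have h : ((100 : Int), ("cultural" : String)) = ((100 : Int), catOf 100) := by norm_num [catOf]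
  unfold classify_destination_py_alt mn
  rw [h, fold_eq types 100 (le_refl _)]

lemma fold_min_le_init (l : List String) (a : Int) :
    l.foldl (fun m t => min m (rkOf t)) a ≤ a := by
  induction l generalizing a with
  | nil => simp
  | cons t l ih => exact le_trans (ih _) (min_le_left _ _)

lemma mn_lb (l : List String) : 0 ≤ mn l := by
  suffices h : ∀ a : Int, 0 ≤ a → 0 ≤ l.foldl (fun m t => min m (rkOf t)) a from
    h 100 (by omega)
  induction l with
  | nil => intro a ha; simpa
  | cons t l ih => intro a ha; exact ih _ (le_min ha (rk_lb t))

lemma mn_le_mem (l : List String) (t : String) (ht : t ∈ l) : mn l ≤ rkOf t := by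
  suffices h : ∀ a : Int, l.foldl (fun m t => min m (rkOf t)) a ≤ rkOf t from h 100
  induction l with
  | nil => cases ht
  | cons u l ih =>
    intro a
    simp only [List.foldl_cons]
    rcases List.mem_cons.mp ht with h | h
    · subst h
      exact le_trans (fold_min_le_init l _) (min_le_right _ _)
    · exact ih h _

lemma mn_mem (l : List String) : mn l = 100 ∨ ∃ t ∈ l, rkOf t = mn l := by
  suffices h : ∀ a : Int,
      l.foldl (fun m t => min m (rkOf t)) a = a ∨
        ∃ t ∈ l, rkOf t = l.foldl (fun m t => min m (rkOf t)) a from h 100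
  induction l with
  | nil => intro a; simp
  | cons u l ih =>
    intro a
    simp only [List.foldl_cons]
    rcases ih (min a (rkOf u)) with h | ⟨t, ht, hrk⟩
    · rcases le_total a (rkOf u) with hle | hle
      · left; rw [h, min_eq_left hle]
      · right; exact ⟨u, List.mem_cons_self .., by rw [h, min_eq_right hle]⟩
    · right; exact ⟨t, List.mem_cons_of_mem _ ht, hrk⟩

lemma cond_iff (types : List String) (ls : List String) (k : Int)
    (hk : ∀ t, rkOf t = k ↔ t ∈ ls) :
    (ls.any (fun t => types.contains t) = true) ↔ ∃ t ∈ types, rkOf t = k := by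
  simp only [List.any_eq_true, List.contains_iff_mem]
  constructor
  · rintro ⟨t, htl, htt⟩; exact ⟨t, htt, (hk t).mpr htl⟩
  · rintro ⟨t, htt, hrk⟩; exact ⟨t, (hk t).mp hrk, htt⟩

-- ===== VERDICT (by name: the statement is the Claim_ definition above) =====
theorem classify_destination_py_spec : Claim_equal_classify_destination_py := by
  intro types _
  show classify_destination_py types = classify_destination_py_alt types
  rw [alt_eq]
  unfold classify_destination_py
  have hmem := mn_mem types
  have hlb := mn_lb types
  split_ifs with h0 h1 h2 h3 h4
  · obtain ⟨t, htt, hrk⟩ := (cond_iff types _ 0 rk_iff_0).mp h0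
    have hle := mn_le_mem types t htt
    have hm : mn types = 0 := by omega
    simp [hm, catOf]
  · obtain ⟨t, htt, hrk⟩ := (cond_iff types _ 1 rk_iff_1).mp h1
    have hle := mn_le_mem types t htt
    have hne0 : mn types ≠ 0 := by
      intro he
      rcases hmem with hm | ⟨u, hu, hrku⟩
      · omega
      · exact h0 ((cond_iff types _ 0 rk_iff_0).mpr ⟨u, hu, by omega⟩)
    have hm : mn types = 1 := by omega
    simp [hm, catOf]
  · obtain ⟨t, htt, hrk⟩ := (cond_iff types _ 2 rk_iff_2).mp h2
    have hle := mn_le_mem types t htt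
    have hm : mn types = 2 := by
      rcases hmem with hm | ⟨u, hu, hrku⟩
      · omega
      · rcases rk_cases u with h | h | h | h | h | h
        · exact absurd ((cond_iff types _ 0 rk_iff_0).mpr ⟨u, hu, h⟩) h0
        · exact absurd ((cond_iff types _ 1 rk_iff_1).mpr ⟨u, hu, h⟩) h1
        all_goals omega
    simp [hm, catOf]
  · obtain ⟨t, htt, hrk⟩ := (cond_iff types _ 3 rk_iff_3).mp h3
    have hle := mn_le_mem types t htt
    have hm : mn types = 3 := by
      rcases hmem with hm | ⟨u, hu, hrku⟩
      · omega
      · rcases rk_cases u with h | h | h | h | h | h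
        · exact absurd ((cond_iff types _ 0 rk_iff_0).mpr ⟨u, hu, h⟩) h0
        · exact absurd ((cond_iff types _ 1 rk_iff_1).mpr ⟨u, hu, h⟩) h1
        · exact absurd ((cond_iff types _ 2 rk_iff_2).mpr ⟨u, hu, h⟩) h2
        all_goals omega
    simp [hm, catOf]
  · obtain ⟨t, htt, hrk⟩ := (cond_iff types _ 4 rk_iff_4).mp h4
    have hle := mn_le_mem types t htt
    have hm : mn types = 4 := by
      rcases hmem with hm | ⟨u, hu, hrku⟩
      · omega
      · rcases rk_cases u with h | h | h | h | h | h
        · exact absurd ((cond_iff types _ 0 rk_iff_0).mpr ⟨u, hu, h⟩) h0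
        · exact absurd ((cond_iff types _ 1 rk_iff_1).mpr ⟨u, hu, h⟩) h1
        · exact absurd ((cond_iff types _ 2 rk_iff_2).mpr ⟨u, hu, h⟩) h2
        · exact absurd ((cond_iff types _ 3 rk_iff_3).mpr ⟨u, hu, h⟩) h3
        all_goals omega
    simp [hm, catOf]
  · have hm : mn types = 100 := by
      rcases hmem with hm | ⟨u, hu, hrku⟩
      · exact hm
      · rcases rk_cases u with h | h | h | h | h | h
        · exact absurd ((cond_iff types _ 0 rk_iff_0).mpr ⟨u, hu, h⟩) h0
        · exact absurd ((cond_iff types _ 1 rk_iff_1).mpr ⟨u, hu, h⟩) h1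
        · exact absurd ((cond_iff types _ 2 rk_iff_2).mpr ⟨u, hu, h⟩) h2
        · exact absurd ((cond_iff types _ 3 rk_iff_3).mpr ⟨u, hu, h⟩) h3
        · exact absurd ((cond_iff types _ 4 rk_iff_4).mpr ⟨u, hu, h⟩) h4
        · omega
    simp [hm, catOf]
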